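-- pv_equiv track=rewrite | github.com/carenthomas/bjc-to-edx | lab_parser.py | separate_elements
-- ===== SOURCE A (Python) =====
-- def count_special(el_inline):
-- 	"""Counts src and hrefs in a list line"""
-- 	return len(list(filter(lambda x: "src" in x or "href" in x, el_inline)))
--
-- def separate_elements(el_inline):
-- 	"""Separates list element of multiple links to several lists of one link"""
-- 	if count_special(el_inline) < 2:
-- 		return [el_inline]
-- 	else:
-- 		end = []
-- 		while count_special(el_inline)>1:
-- 			index = 0
-- 			result = []
-- 			while "src" not in el_inline[index] and "href" not in el_inline[index]:
-- 				result += [el_inline[index]]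
-- 				index += 1
-- 			result += [el_inline[index]]
-- 			end.append(result)
-- 			el_inline = el_inline[index+1:]
-- 		end.append(el_inline)
-- 		return end
-- ===== SOURCE B (Python) =====
-- def separate_elements(el_inline):
-- 	"""Separates list element of multiple links to several lists of one link"""
-- 	positions = []
-- 	for i, x in enumerate(el_inline):
-- 		if "src" in x or "href" in x:
-- 			positions.append(i)
-- 	if len(positions) < 2:
-- 		return [el_inline]
-- 	out = []
-- 	prev = 0
-- 	for p in positions[:-1]:
-- 		out.append(el_inline[prev:p + 1])
-- 		prev = p + 1
-- 	out.append(el_inline[prev:])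
-- 	return out
-- ===== Notes on version B (the rewrite author's own statement) =====
-- stated objective: alternative
-- what changed: B replaces A's repeated rescan-and-reslice while-loop (count_special recounted on each shrinking suffix) with one pass collecting the indices of link elements, then direct slicing between consecutive cut points.
import Mathlib
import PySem

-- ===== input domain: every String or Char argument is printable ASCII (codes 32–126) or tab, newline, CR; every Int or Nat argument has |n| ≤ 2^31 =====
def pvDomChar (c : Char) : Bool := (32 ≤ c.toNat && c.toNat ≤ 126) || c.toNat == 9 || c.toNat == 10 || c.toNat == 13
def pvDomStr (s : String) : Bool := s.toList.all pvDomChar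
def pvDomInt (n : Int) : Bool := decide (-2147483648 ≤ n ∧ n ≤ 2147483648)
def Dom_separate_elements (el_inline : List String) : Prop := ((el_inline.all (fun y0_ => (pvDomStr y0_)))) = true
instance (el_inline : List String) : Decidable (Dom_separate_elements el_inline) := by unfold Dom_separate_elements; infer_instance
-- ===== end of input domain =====

-- B replaces A's repeated rescan-and-reslice loop by one index-collecting pass plus direct slicing (alternative algorithm; quadratic behaviour of A only on link-dense inputs, not on the timed inputs).

-- ===== PORT A =====
-- '"src" in x or "href" in x'
def pvSpecial (x : String) : Bool := PySem.Str.isIn "src" x || PySem.Str.isIn "href" x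

-- count_special: len(list(filter(...)))
def count_special (el_inline : List String) : Nat :=
  (el_inline.filter pvSpecial).length

-- inner while loop of A: walks index 0,1,… collecting non-special elements, then takes the
-- first special one; returns (result, el_inline[index+1:]).  Transcribed as structural
-- recursion down the list (index+1 = moving to the tail); if no special element remains it
-- stops at the end (unreachable under the outer loop's guard count_special > 1).
def pvInnerA (result : List String) : List String → (List String × List String)
  | [] => (result, [])
  | x :: xs => if !pvSpecial x then pvInnerA (result ++ [x]) xs else (result ++ [x], xs)

theorem pvInnerA_snd_len (result : List String) (l : List String) :
    (pvInnerA result l).2.length ≤ l.length := by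
  induction l generalizing result with
  | nil => simp [pvInnerA]
  | cons x xs ih =>
      simp only [pvInnerA]
      split
      · exact le_trans (ih _) (Nat.le_succ _)
      · simp

-- outer while loop of A, with accumulator 'end'
def pvOuterA (end_ : List (List String)) (el_inline : List String) : List (List String) :=
  if count_special el_inline > 1 then
    let r := pvInnerA [] el_inline
    pvOuterA (end_ ++ [r.1]) r.2
  else end_ ++ [el_inline]
termination_by el_inline.length
decreasing_by
  rename_i h
  have h1 : el_inline ≠ [] := by
    intro he; subst he; simp [count_special] at h
  cases el_inline with
  | nil => exact absurd rfl h1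
  | cons x xs =>
      simp only [pvInnerA]
      split
      · exact Nat.lt_succ_of_le (pvInnerA_snd_len _ _)
      · simp

def separate_elements (el_inline : List String) : List (List String) :=
  if count_special el_inline < 2 then [el_inline]
  else pvOuterA [] el_inline

-- ===== PORT B =====
-- one pass over enumerate(el_inline) collecting the indices of special elements
def pvPositions (i : Nat) : List String → List Nat
  | [] => []
  | x :: xs => if pvSpecial x then i :: pvPositions (i + 1) xs else pvPositions (i + 1) xs

-- 'for p in positions[:-1]: out.append(el_inline[prev:p+1]); prev = p+1' then the tail slice.
-- Slices have 0 ≤ prev ≤ p+1 ≤ len here, so el_inline[prev:p+1] = (drop prev).take (p+1-prev),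
-- exact for Python slicing on non-negative in-range bounds.
def pvFoldB (el_inline : List String) : List Nat → List (List String) → Nat → List (List String)
  | [], out, prev => out ++ [el_inline.drop prev]
  | p :: ps, out, prev => pvFoldB el_inline ps (out ++ [(el_inline.drop prev).take (p + 1 - prev)]) (p + 1)

def separate_elements_alt (el_inline : List String) : List (List String) :=
  let positions := pvPositions 0 el_inline
  if positions.length < 2 then [el_inline]
  else pvFoldB el_inline positions.dropLast [] 0

-- ===== PRECONDITION & SPEC =====
def Spec_separate_elements (el_inline : List String) (out : List (List String)) : Prop := out = separate_elements_alt el_inline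
instance (el_inline : List String) (out : List (List String)) : Decidable (Spec_separate_elements el_inline out) := by unfold Spec_separate_elements; infer_instance

-- ===== CLAIM (what is proved, stated in full; the proofs are below) =====
def Claim_equal_separate_elements : Prop := ∀ (el_inline : List String), Dom_separate_elements el_inline → Spec_separate_elements el_inline (separate_elements el_inline)

-- ===== LEMMAS AND PROOFS =====

theorem pvPositions_shift (l : List String) (i : Nat) :
    pvPositions i l = (pvPositions 0 l).map (· + i) := by
  induction l generalizing i with
  | nil => simp [pvPositions]
  | cons x xs ih =>
      simp only [pvPositions]
      by_cases h : pvSpecial x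
      · simp [h, ih (i+1), ih 1, List.map_map, Function.comp_def, Nat.add_comm, Nat.add_left_comm]
      · simp [h, ih (i+1), ih 1, List.map_map, Function.comp_def, Nat.add_comm, Nat.add_left_comm]

theorem pvPositions_len (l : List String) (i : Nat) :
    (pvPositions i l).length = count_special l := by
  induction l generalizing i with
  | nil => simp [pvPositions, count_special]
  | cons x xs ih =>
      simp only [pvPositions, count_special, List.filter]
      by_cases h : pvSpecial x <;> simp [h, ih, count_special]

theorem pvDropHelp (pre rest : List String) (n : Nat) :
    (pre ++ rest).drop (n + pre.length) = rest.drop n := by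
  rw [Nat.add_comm, List.drop_append]; simp

theorem pvFoldB_acc (el : List String) (ps : List Nat) (out : List (List String)) (prev : Nat) :
    pvFoldB el ps out prev = out ++ pvFoldB el ps [] prev := by
  induction ps generalizing out prev with
  | nil => simp [pvFoldB]
  | cons p ps ih =>
      simp only [pvFoldB]
      rw [ih, ih ([] ++ _)]
      simp

theorem pvFoldB_shift (pre rest : List String) (ps : List Nat) (prev : Nat) :
    pvFoldB (pre ++ rest) (ps.map (· + pre.length)) [] (prev + pre.length)
      = pvFoldB rest ps [] prev := by
  induction ps generalizing prev with
  | nil => simp [pvFoldB, pvDropHelp]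
  | cons p ps ih =>
      simp only [List.map_cons, pvFoldB]
      rw [pvFoldB_acc, pvFoldB_acc rest]
      have harith : p + pre.length + 1 - (prev + pre.length) = p + 1 - prev := by omega
      rw [pvDropHelp, harith, show p + pre.length + 1 = (p + 1) + pre.length by omega, ih]

theorem pvPositions_decomp (pre rest : List String) (s : String)
    (hpre : ∀ x ∈ pre, pvSpecial x = false) (hs : pvSpecial s = true) :
    pvPositions 0 (pre ++ s :: rest)
      = pre.length :: (pvPositions 0 rest).map (· + (pre.length + 1)) := by
  induction pre with
  | nil => simp [pvPositions, hs, pvPositions_shift rest 1]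
  | cons x xs ih =>
      have hx : pvSpecial x = false := hpre x (by simp)
      simp only [List.cons_append, pvPositions, hx, Bool.false_eq_true, if_false]
      rw [pvPositions_shift, ih (fun y hy => hpre y (by simp [hy]))]
      simp only [List.map_cons, List.map_map, Function.comp_def, List.length_cons]
      congr 1

theorem count_special_decomp (pre rest : List String) (s : String)
    (hpre : ∀ x ∈ pre, pvSpecial x = false) (hs : pvSpecial s = true) :
    count_special (pre ++ s :: rest) = count_special rest + 1 := by
  have h0 : count_special pre = 0 := by
    simp only [count_special, List.length_eq_zero_iff, List.filter_eq_nil_iff]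
    intro a ha; simp [hpre a ha]
  simp only [count_special, List.filter_append, List.length_append, List.filter, hs]
  have : (List.filter pvSpecial pre).length = 0 := h0
  simp [this]

theorem pvInnerA_decomp (pre rest : List String) (s : String) (acc : List String)
    (hpre : ∀ x ∈ pre, pvSpecial x = false) (hs : pvSpecial s = true) :
    pvInnerA acc (pre ++ s :: rest) = (acc ++ pre ++ [s], rest) := by
  induction pre generalizing acc with
  | nil => simp [pvInnerA, hs]
  | cons x xs ih =>
      have hx : pvSpecial x = false := hpre x (by simp)
      simp only [List.cons_append, pvInnerA, hx, Bool.not_false, if_pos]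
      rw [ih _ (fun y hy => hpre y (by simp [hy]))]
      simp

theorem pvInnerA_snd_lt (el : List String) (acc : List String) (h : el ≠ []) :
    (pvInnerA acc el).2.length < el.length := by
  cases el with
  | nil => exact absurd rfl h
  | cons x xs =>
      simp only [pvInnerA]
      split
      · exact Nat.lt_succ_of_le (pvInnerA_snd_len _ _)
      · simp

theorem pvOuterA_acc_aux (n : Nat) : ∀ (el : List String), el.length ≤ n →
    ∀ acc, pvOuterA acc el = acc ++ pvOuterA [] el := by
  induction n with
  | zero =>
      intro el hl acc
      have : el = [] := List.length_eq_zero_iff.mp (Nat.le_zero.mp hl)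
      subst this
      conv_lhs => rw [pvOuterA]
      conv_rhs => rw [pvOuterA]
      simp [count_special]
  | succ n ih =>
      intro el hl acc
      conv_lhs => rw [pvOuterA]
      conv_rhs => rw [pvOuterA]
      by_cases h : count_special el > 1
      · have hne : el ≠ [] := by intro he; subst he; simp [count_special] at h
        have hlt : (pvInnerA [] el).2.length ≤ n :=
          Nat.lt_succ_iff.mp (Nat.lt_of_lt_of_le (pvInnerA_snd_lt el [] hne) hl)
        simp only [h, if_pos]
        rw [ih _ hlt, ih _ hlt ([] ++ _)]
        simp
      · simp [h]

theorem pvOuterA_acc (el : List String) (acc : List (List String)) :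
    pvOuterA acc el = acc ++ pvOuterA [] el :=
  pvOuterA_acc_aux el.length el (Nat.le_refl _) acc

-- B's recursive characterisation
theorem altB_decomp (pre rest : List String) (s : String)
    (hpre : ∀ x ∈ pre, pvSpecial x = false) (hs : pvSpecial s = true)
    (hcnt : 1 ≤ count_special rest) :
    separate_elements_alt (pre ++ s :: rest)
      = (pre ++ [s]) :: separate_elements_alt rest := by
  have hpos := pvPositions_decomp pre rest s hpre hs
  have hlenr : (pvPositions 0 rest).length = count_special rest := pvPositions_len rest 0
  have hne : pvPositions 0 rest ≠ [] := by
    intro h; rw [h] at hlenr; simp at hlenr; omega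
  simp only [separate_elements_alt, hpos]
  have hlen2 : ¬ ((pre.length :: (pvPositions 0 rest).map (· + (pre.length + 1))).length < 2) := by
    simp only [List.length_cons, List.length_map]; omega
  rw [if_neg hlen2]
  have hdl : (pre.length :: (pvPositions 0 rest).map (· + (pre.length + 1))).dropLast
      = pre.length :: ((pvPositions 0 rest).dropLast.map (· + (pre.length + 1))) := by
    cases hP : pvPositions 0 rest with
    | nil => exact absurd hP hne
    | cons a l =>
        rw [List.dropLast_cons_of_ne_nil (by simp), List.map_dropLast]
  rw [hdl]
  simp only [pvFoldB]
  rw [pvFoldB_acc]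
  have htake : ((pre ++ s :: rest).drop 0).take (pre.length + 1 - 0) = pre ++ [s] := by
    simp only [List.drop_zero, Nat.sub_zero]
    rw [List.take_append]
    simp
  rw [htake]
  have hshift : pvFoldB (pre ++ s :: rest) ((pvPositions 0 rest).dropLast.map (· + (pre.length + 1))) [] (pre.length + 1)
      = pvFoldB rest (pvPositions 0 rest).dropLast [] 0 := by
    have h := pvFoldB_shift (pre ++ [s]) rest (pvPositions 0 rest).dropLast 0
    simp only [List.length_append, List.length_cons, List.length_nil, Nat.zero_add] at h
    simpa using h
  rw [hshift]
  by_cases h2 : (pvPositions 0 rest).length < 2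
  · rw [if_pos h2]
    cases hP : pvPositions 0 rest with
    | nil => exact absurd hP hne
    | cons a l =>
        have hl : l = [] := by
          rw [hP] at hlenr h2
          simp only [List.length_cons] at h2
          exact List.length_eq_zero_iff.mp (by omega)
        subst hl
        simp [pvFoldB]
  · rw [if_neg h2]
    simp

-- A's recursive characterisation
theorem a_decomp (pre rest : List String) (s : String)
    (hpre : ∀ x ∈ pre, pvSpecial x = false) (hs : pvSpecial s = true)
    (hcnt : 1 ≤ count_special rest) :
    separate_elements (pre ++ s :: rest)
      = (pre ++ [s]) :: separate_elements rest := by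
  have hc := count_special_decomp pre rest s hpre hs
  have h2 : ¬ count_special (pre ++ s :: rest) < 2 := by omega
  simp only [separate_elements, if_neg h2]
  rw [pvOuterA, if_pos (by omega), pvInnerA_decomp pre rest s [] hpre hs]
  simp only [List.nil_append]
  rw [pvOuterA_acc]
  simp only [List.singleton_append]
  by_cases hr : count_special rest < 2
  · rw [if_pos hr, pvOuterA, if_neg (by omega)]
    simp
  · rw [if_neg hr]

theorem exists_first_special (el : List String) (h : 1 ≤ count_special el) :
    ∃ pre s rest, el = pre ++ s :: rest ∧ (∀ x ∈ pre, pvSpecial x = false) ∧ pvSpecial s = true := by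
  induction el with
  | nil => simp [count_special] at h
  | cons x xs ih =>
      by_cases hx : pvSpecial x
      · exact ⟨[], x, xs, by simp, by simp, hx⟩
      · have hxs : 1 ≤ count_special xs := by
          simp only [count_special, List.filter, hx] at h ⊢
          exact h
        obtain ⟨pre, s, rest, heq, hpre, hs⟩ := ih hxs
        refine ⟨x :: pre, s, rest, by simp [heq], ?_, hs⟩
        intro y hy
        rcases List.mem_cons.mp hy with h1 | h1
        · subst h1; simpa using hx
        · exact hpre y h1

theorem main_equiv_aux (n : Nat) : ∀ (el : List String), el.length ≤ n →
    separate_elements el = separate_elements_alt el := by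
  induction n with
  | zero =>
      intro el hl
      have : el = [] := List.length_eq_zero_iff.mp (Nat.le_zero.mp hl)
      subst this
      simp [separate_elements, separate_elements_alt, count_special, pvPositions]
  | succ n ih =>
      intro el hl
      by_cases h2 : count_special el < 2
      · have hp : (pvPositions 0 el).length < 2 := by rw [pvPositions_len]; omega
        simp [separate_elements, separate_elements_alt, h2, hp]
      · obtain ⟨pre, s, rest, heq, hpre, hs⟩ := exists_first_special el (by omega)
        subst heq
        have hc := count_special_decomp pre rest s hpre hs
        have hcnt : 1 ≤ count_special rest := by omega
        rw [a_decomp pre rest s hpre hs hcnt, altB_decomp pre rest s hpre hs hcnt]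
        have hlen : rest.length ≤ n := by
          have : (pre ++ s :: rest).length ≤ n + 1 := hl
          simp only [List.length_append, List.length_cons] at this
          omega
        rw [ih rest hlen]

theorem main_equiv (el : List String) :
    separate_elements el = separate_elements_alt el :=
  main_equiv_aux el.length el (Nat.le_refl _)

-- ===== VERDICT (by name: the statement is the Claim_ definition above) =====
theorem separate_elements_spec : Claim_equal_separate_elements := by
  intro el _
  unfold Spec_separate_elements
  exact main_equiv el
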